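-- pv_equiv track=rewrite | github.com/diogofernandesc/advent-of-code-2021 | day3/solution.py | _get_commonality_at_index
-- ===== SOURCE A (Python) =====
-- def _get_commonality_at_index(numbers_list, index, inverse=False):
--     no_of_zeros = 0
--     no_of_1s = 0
--
--     zero_indexes = []
--     one_indexes = []
--     count = 0
--     for binary_number in numbers_list:
--         val = binary_number[index]
--         if int(val) == 0:
--             no_of_zeros += 1
--             zero_indexes.append(count)
--         else:
--             no_of_1s += 1
--             one_indexes.append(count)
--         count += 1
--
--     if inverse:
--         if no_of_zeros > no_of_1s:
--             return one_indexes
--         return zero_indexes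
--
--     if no_of_zeros > no_of_1s:
--         return zero_indexes
--
--     return one_indexes
-- ===== SOURCE B (Python) =====
-- def _get_commonality_at_index(numbers_list, index, inverse=False):
--     no_of_zeros = sum(1 for b in numbers_list if int(b[index]) == 0)
--     no_of_1s = len(numbers_list) - no_of_zeros
--     keep_zero = (no_of_zeros > no_of_1s) != inverse
--     if keep_zero:
--         return [i for i, b in enumerate(numbers_list) if int(b[index]) == 0]
--     return [i for i, b in enumerate(numbers_list) if int(b[index]) != 0]
-- ===== Notes on version B (the rewrite author's own statement) =====
-- stated objective: simpler
-- what changed: Replaces the five-variable dual-list accumulation loop by count-then-filter: one pass counts zeros (ones = len - zeros), a boolean decides which bit value is kept, and a single filtered enumerate comprehension builds the result.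
import Mathlib
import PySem

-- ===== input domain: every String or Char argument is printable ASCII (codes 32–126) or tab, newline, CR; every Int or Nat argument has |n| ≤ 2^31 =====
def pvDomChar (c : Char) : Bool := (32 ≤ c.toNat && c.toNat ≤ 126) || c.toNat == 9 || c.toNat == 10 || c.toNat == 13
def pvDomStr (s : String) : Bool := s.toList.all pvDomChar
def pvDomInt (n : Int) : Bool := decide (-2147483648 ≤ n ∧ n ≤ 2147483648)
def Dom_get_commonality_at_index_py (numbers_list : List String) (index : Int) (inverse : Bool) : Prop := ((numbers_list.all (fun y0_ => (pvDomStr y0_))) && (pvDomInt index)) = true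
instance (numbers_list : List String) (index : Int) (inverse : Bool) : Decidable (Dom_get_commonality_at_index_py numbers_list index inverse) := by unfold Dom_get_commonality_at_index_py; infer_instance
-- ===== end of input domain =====

-- B changes the decomposition: count zeros once, decide which bit value to keep, build the answer
-- with one filtered enumerate pass (same cost, simpler than A's dual-list accumulation).

-- int(binary_number[index]) — shared by both ports (the same expression appears in both Pythons);
-- total via getD 0, used only under Pre_ (which rules out the IndexError/ValueError inputs).
def pvCharVal (s : String) (index : Int) : Int :=
  ((PySem.Str.pyGet? s index).bind (fun c => PySem.Int.ofChars? [c])).getD 0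

-- the two tests int(b[index]) == 0 / != 0, named so both ports share them
def pvZeroP (index : Int) (b : String) : Bool := pvCharVal b index == 0
def pvOneP (index : Int) (b : String) : Bool := pvCharVal b index != 0

-- ===== PORT A =====
-- the for-loop's state: (no_of_zeros, no_of_1s, zero_indexes, one_indexes), threading count
def pvLoopA (index : Int) (xs : List String) (nz n1 : Int) (zi oi : List Int) (count : Int) :
    Int × Int × List Int × List Int :=
  match xs with
  | [] => (nz, n1, zi, oi)
  | b :: rest =>
    if pvCharVal b index = 0 then
      pvLoopA index rest (nz + 1) n1 (zi ++ [count]) oi (count + 1)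
    else
      pvLoopA index rest nz (n1 + 1) zi (oi ++ [count]) (count + 1)

def get_commonality_at_index_py (numbers_list : List String) (index : Int) (inverse : Bool) : List Int :=
  let r := pvLoopA index numbers_list 0 0 [] [] 0
  if inverse then
    if r.1 > r.2.1 then r.2.2.2 else r.2.2.1
  else
    if r.1 > r.2.1 then r.2.2.1 else r.2.2.2

-- ===== PORT B =====
def get_commonality_at_index_py_alt (numbers_list : List String) (index : Int) (inverse : Bool) : List Int :=
  let no_of_zeros : Int := (numbers_list.countP (pvZeroP index) : Nat)
  let no_of_1s : Int := (numbers_list.length : Int) - no_of_zeros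
  let keep_zero : Bool := (decide (no_of_zeros > no_of_1s)) != inverse
  if keep_zero then
    ((PySem.List.enumerate numbers_list 0).filter (fun p => pvZeroP index p.2)).map (·.1)
  else
    ((PySem.List.enumerate numbers_list 0).filter (fun p => pvOneP index p.2)).map (·.1)

-- ===== PRECONDITION & SPEC =====
-- Pre_ excludes exactly the inputs where Python A raises: a string too short for the index
-- (IndexError) or whose character there is not a decimal digit (ValueError from int()).
def Pre_get_commonality_at_index_py (numbers_list : List String) (index : Int) (inverse : Bool) : Prop :=
  ∀ s ∈ numbers_list, ((PySem.Str.pyGet? s index).any (fun c => c.isDigit)) = true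
instance (numbers_list : List String) (index : Int) (inverse : Bool) : Decidable (Pre_get_commonality_at_index_py numbers_list index inverse) := by unfold Pre_get_commonality_at_index_py; infer_instance

def pvWitness_get_commonality_at_index_py : List String × Int × Bool := (["01", "10", "11"], 0, false)

def Spec_get_commonality_at_index_py (numbers_list : List String) (index : Int) (inverse : Bool) (out : List Int) : Prop := out = get_commonality_at_index_py_alt numbers_list index inverse
instance (numbers_list : List String) (index : Int) (inverse : Bool) (out : List Int) : Decidable (Spec_get_commonality_at_index_py numbers_list index inverse out) := by unfold Spec_get_commonality_at_index_py; infer_instance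

-- ===== CLAIM (what is proved, stated in full; the proofs are below) =====
def Claim_equal_get_commonality_at_index_py : Prop := ∀ (numbers_list : List String) (index : Int) (inverse : Bool), Dom_get_commonality_at_index_py numbers_list index inverse → Pre_get_commonality_at_index_py numbers_list index inverse → Spec_get_commonality_at_index_py numbers_list index inverse (get_commonality_at_index_py numbers_list index inverse)

-- ===== LEMMAS AND PROOFS =====

-- A's loop computes: zero count, one count, and the two filtered index lists of B.
lemma pvLoopA_spec (index : Int) (xs : List String) (nz n1 : Int) (zi oi : List Int) (count : Int) :
    pvLoopA index xs nz n1 zi oi count =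
      (nz + (xs.countP (pvZeroP index) : Nat),
       n1 + (xs.countP (pvOneP index) : Nat),
       zi ++ ((PySem.List.enumerate xs count).filter (fun p => pvZeroP index p.2)).map (·.1),
       oi ++ ((PySem.List.enumerate xs count).filter (fun p => pvOneP index p.2)).map (·.1)) := by
  induction xs generalizing nz n1 zi oi count with
  | nil => simp [pvLoopA, PySem.List.enumerate_nil]
  | cons b rest ih =>
    by_cases h : pvCharVal b index = 0 <;>
      simp [pvLoopA, pvZeroP, pvOneP, h, ih, PySem.List.enumerate_cons] <;> omega

-- the two counts partition the list
lemma pvCount_split (index : Int) (xs : List String) :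
    xs.countP (pvZeroP index) + xs.countP (pvOneP index) = xs.length := by
  induction xs with
  | nil => simp
  | cons b rest ih =>
    by_cases h : pvCharVal b index = 0 <;> simp [pvZeroP, pvOneP, h] <;> omega

-- ===== VERDICT (by name: the statement is the Claim_ definition above) =====
theorem get_commonality_at_index_py_spec : Claim_equal_get_commonality_at_index_py := by
  intro numbers_list index inverse _ _
  unfold Spec_get_commonality_at_index_py
  unfold get_commonality_at_index_py get_commonality_at_index_py_alt
  rw [pvLoopA_spec]
  have hsplit := pvCount_split index numbers_list
  cases inverse <;>
    simp only [Bool.bne_false, Bool.bne_true, gt_iff_lt, List.nil_append, zero_add, decide_eq_true_eq, Bool.not_eq_true', Bool.false_eq_true, if_false, if_true] <;>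
    split_ifs <;>
      first
        | rfl
        | (exfalso; simp only [decide_eq_false_iff_not, not_lt, not_le] at *; omega)
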